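-- pv_equiv track=rewrite | github.com/cgartco6/apex-studio-platform | ai-agents/support-agents/course_support.py | _analyze_question_topic
-- ===== SOURCE A (Python) =====
-- from typing import Dict, List, Any
--
-- def _analyze_question_topic(question: str) -> List[str]:
--     """Analyze question topic"""
--     topics = []
--
--     if any(word in question.lower() for word in ["client", "customer", "sell"]):
--         topics.append("client_acquisition")
--     if any(word in question.lower() for word in ["price", "charge", "cost"]):
--         topics.append("pricing")
--     if any(word in question.lower() for word in ["tool", "software", "app"]):
--         topics.append("tools")
--     if any(word in question.lower() for word in ["logo", "brand", "design"]):
--         topics.append("design")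
--     if any(word in question.lower() for word in ["money", "income", "revenue"]):
--         topics.append("earnings")
--
--     return topics
-- ===== SOURCE B (Python) =====
-- KEYWORD_TOPIC = [
--     ("client", "client_acquisition"), ("customer", "client_acquisition"), ("sell", "client_acquisition"),
--     ("price", "pricing"), ("charge", "pricing"), ("cost", "pricing"),
--     ("tool", "tools"), ("software", "tools"), ("app", "tools"),
--     ("logo", "design"), ("brand", "design"), ("design", "design"),
--     ("money", "earnings"), ("income", "earnings"), ("revenue", "earnings"),
-- ]
-- TOPIC_ORDER = ["client_acquisition", "pricing", "tools", "design", "earnings"]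
--
-- def _analyze_question_topic(question: str):
--     """Analyze question topic: one scan over the text positions, matching keywords by prefix."""
--     q = question.lower()
--     found = set()
--     for i in range(len(q)):
--         for kw, topic in KEYWORD_TOPIC:
--             if q.startswith(kw, i):
--                 found.add(topic)
--     return [t for t in TOPIC_ORDER if t in found]
-- ===== Notes on version B (the rewrite author's own statement) =====
-- stated objective: alternative
-- what changed: Instead of five per-topic substring tests, B does one scan over the text positions, matching each position against a keyword-to-topic table by prefix, accumulating matched topics in a set, and finally emits topics in canonical order.
import Mathlib
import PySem

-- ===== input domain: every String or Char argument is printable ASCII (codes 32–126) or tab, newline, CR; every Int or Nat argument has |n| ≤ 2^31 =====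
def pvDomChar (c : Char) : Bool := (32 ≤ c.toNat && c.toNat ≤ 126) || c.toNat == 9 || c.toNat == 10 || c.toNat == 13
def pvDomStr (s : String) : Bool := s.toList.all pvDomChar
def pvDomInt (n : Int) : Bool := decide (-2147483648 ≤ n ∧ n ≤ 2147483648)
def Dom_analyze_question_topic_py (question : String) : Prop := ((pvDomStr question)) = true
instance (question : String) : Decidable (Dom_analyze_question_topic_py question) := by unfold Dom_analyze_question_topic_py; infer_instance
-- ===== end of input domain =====

-- B replaces A's five per-topic substring tests by one scan over the text positions
-- matching a keyword->topic table by prefix, then emits topics in canonical order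
-- (objective: alternative algorithm, same cost).

-- ===== PORT A =====
-- literal transliteration: topics = [], five ifs each testing any(word in question.lower())
def analyze_question_topic_py (question : String) : List String :=
  let topics : List String := []
  let topics := if ["client", "customer", "sell"].any
      (fun w => PySem.Str.isIn w (PySem.Str.lower question))
    then topics ++ ["client_acquisition"] else topics
  let topics := if ["price", "charge", "cost"].any
      (fun w => PySem.Str.isIn w (PySem.Str.lower question))
    then topics ++ ["pricing"] else topics
  let topics := if ["tool", "software", "app"].any
      (fun w => PySem.Str.isIn w (PySem.Str.lower question))
    then topics ++ ["tools"] else topics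
  let topics := if ["logo", "brand", "design"].any
      (fun w => PySem.Str.isIn w (PySem.Str.lower question))
    then topics ++ ["design"] else topics
  let topics := if ["money", "income", "revenue"].any
      (fun w => PySem.Str.isIn w (PySem.Str.lower question))
    then topics ++ ["earnings"] else topics
  topics

-- ===== PORT B =====
def KEYWORD_TOPIC : List (String × String) :=
  [ ("client", "client_acquisition"), ("customer", "client_acquisition"), ("sell", "client_acquisition"),
    ("price", "pricing"), ("charge", "pricing"), ("cost", "pricing"),
    ("tool", "tools"), ("software", "tools"), ("app", "tools"),
    ("logo", "design"), ("brand", "design"), ("design", "design"),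
    ("money", "earnings"), ("income", "earnings"), ("revenue", "earnings") ]

def TOPIC_ORDER : List String :=
  ["client_acquisition", "pricing", "tools", "design", "earnings"]

-- q.startswith(kw, i) is ported as Chars.startswith on the dropped suffix (exact: Python startswith with a start offset tests the prefix of the suffix at i).
def analyze_question_topic_py_alt (question : String) : List String :=
  let q := (PySem.Str.lower question).toList
  let found : PySem.Set String := (List.range q.length).foldl
    (fun acc i => KEYWORD_TOPIC.foldl
      (fun acc p => if PySem.Chars.startswith (q.drop i) p.1.toList
                    then PySem.Set.add acc p.2 else acc) acc)
    PySem.Set.empty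
  TOPIC_ORDER.filter (fun t => PySem.Set.contains found t)

-- ===== PRECONDITION & SPEC =====
def Spec_analyze_question_topic_py (question : String) (out : List String) : Prop := out = analyze_question_topic_py_alt question
instance (question : String) (out : List String) : Decidable (Spec_analyze_question_topic_py question out) := by unfold Spec_analyze_question_topic_py; infer_instance

-- ===== CLAIM (what is proved, stated in full; the proofs are below) =====
def Claim_equal_analyze_question_topic_py : Prop := ∀ (question : String), Dom_analyze_question_topic_py question → Spec_analyze_question_topic_py question (analyze_question_topic_py question)

-- ===== LEMMAS AND PROOFS =====

-- the set of topics B's scan collects (proof-side name for the fold inside the port)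
def pvFound (question : String) : PySem.Set String :=
  let q := (PySem.Str.lower question).toList
  (List.range q.length).foldl
    (fun acc i => KEYWORD_TOPIC.foldl
      (fun acc p => if PySem.Chars.startswith (q.drop i) p.1.toList
                    then PySem.Set.add acc p.2 else acc) acc)
    PySem.Set.empty

lemma alt_eq (question : String) :
    analyze_question_topic_py_alt question
      = TOPIC_ORDER.filter (fun t => PySem.Set.contains (pvFound question) t) := rfl

-- membership in the inner fold over an arbitrary keyword table
lemma mem_inner (q : List Char) (i : Nat) (l : List (String × String))
    (acc : PySem.Set String) (t : String) :
    t ∈ l.foldl (fun acc p => if PySem.Chars.startswith (q.drop i) p.1.toList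
                    then PySem.Set.add acc p.2 else acc) acc ↔
    t ∈ acc ∨ ∃ p ∈ l, PySem.Chars.startswith (q.drop i) p.1.toList = true ∧ p.2 = t := by
  induction l generalizing acc with
  | nil => simp
  | cons p l ih =>
    simp only [List.foldl_cons, ih, List.mem_cons]
    by_cases h : PySem.Chars.startswith (q.drop i) p.1.toList = true
    · simp [h, PySem.Set.mem_add]; tauto
    · simp only [if_neg h]
      constructor
      · rintro (ha | ⟨p', hp', hs, ht⟩)
        · exact Or.inl ha
        · exact Or.inr ⟨p', Or.inr hp', hs, ht⟩
      · rintro (ha | ⟨p', (rfl | hp'), hs, ht⟩)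
        · exact Or.inl ha
        · exact absurd hs h
        · exact Or.inr ⟨p', hp', hs, ht⟩

-- membership in the outer fold over positions
lemma mem_outer (q : List Char) (is : List Nat) (acc : PySem.Set String) (t : String) :
    t ∈ is.foldl
      (fun acc i => KEYWORD_TOPIC.foldl
        (fun acc p => if PySem.Chars.startswith (q.drop i) p.1.toList
                      then PySem.Set.add acc p.2 else acc) acc) acc ↔
    t ∈ acc ∨ ∃ i ∈ is, ∃ p ∈ KEYWORD_TOPIC,
        PySem.Chars.startswith (q.drop i) p.1.toList = true ∧ p.2 = t := by
  induction is generalizing acc with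
  | nil => simp
  | cons i is ih =>
    simp only [List.foldl_cons, ih, mem_inner, List.mem_cons]
    constructor
    · rintro ((ha | ⟨p, hp, hs, ht⟩) | ⟨j, hj, p, hp, hs, ht⟩)
      · exact Or.inl ha
      · exact Or.inr ⟨i, Or.inl rfl, p, hp, hs, ht⟩
      · exact Or.inr ⟨j, Or.inr hj, p, hp, hs, ht⟩
    · rintro (ha | ⟨j, (rfl | hj), p, hp, hs, ht⟩)
      · exact Or.inl (Or.inl ha)
      · exact Or.inl (Or.inr ⟨p, hp, hs, ht⟩)
      · exact Or.inr ⟨j, hj, p, hp, hs, ht⟩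

-- a bounded position-scan for a nonempty keyword is exactly substring membership
lemma scan_iff_isIn (q w : List Char) (hw : w ≠ []) :
    (∃ i ∈ List.range q.length, PySem.Chars.startswith (q.drop i) w = true) ↔
    PySem.Chars.isIn w q = true := by
  rw [← PySem.Chars.exists_prefix_drop_iff_isIn]
  constructor
  · rintro ⟨i, _, h⟩
    exact ⟨i, (PySem.Chars.startswith_iff _ _).mp h⟩
  · rintro ⟨j, hj⟩
    by_cases hlt : j < q.length
    · exact ⟨j, List.mem_range.mpr hlt, (PySem.Chars.startswith_iff _ _).mpr hj⟩
    · exfalso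
      rw [List.drop_eq_nil_of_le (le_of_not_gt hlt)] at hj
      exact hw (List.prefix_nil.mp hj)

-- per-topic: the scan set contains t iff some of t's keywords is a substring
lemma contains_found_eq (question : String) (t : String) (ws : List String)
    (hw : ∀ w ∈ ws, w.toList ≠ [])
    (hgroup : ∀ pred : String → Prop,
      (∃ p ∈ KEYWORD_TOPIC, pred p.1 ∧ p.2 = t) ↔ ∃ w ∈ ws, pred w) :
    PySem.Set.contains (pvFound question) t
      = ws.any (fun w => PySem.Str.isIn w (PySem.Str.lower question)) := by
  rw [Bool.eq_iff_iff]
  rw [PySem.Set.contains_iff]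
  unfold pvFound
  rw [mem_outer]
  simp only [PySem.Set.empty, List.not_mem_nil, false_or]
  constructor
  · rintro ⟨i, hi, hp⟩
    obtain ⟨w, hwmem, hs⟩ :=
      (hgroup (fun w => PySem.Chars.startswith
        (((PySem.Str.lower question).toList).drop i) w.toList = true)).mp hp
    have := (scan_iff_isIn ((PySem.Str.lower question).toList) w.toList
        (hw w hwmem)).mp ⟨i, hi, hs⟩
    simp only [List.any_eq_true]
    exact ⟨w, hwmem, by simpa [PySem.Str.isIn] using this⟩
  · intro h
    simp only [List.any_eq_true] at h
    obtain ⟨w, hwmem, hin⟩ := h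
    have hin' : PySem.Chars.isIn w.toList ((PySem.Str.lower question).toList) = true := by
      simpa [PySem.Str.isIn] using hin
    obtain ⟨i, hi, hs⟩ :=
      (scan_iff_isIn ((PySem.Str.lower question).toList) w.toList (hw w hwmem)).mpr hin'
    exact ⟨i, hi, (hgroup (fun w => PySem.Chars.startswith
      (((PySem.Str.lower question).toList).drop i) w.toList = true)).mpr ⟨w, hwmem, hs⟩⟩

-- ===== VERDICT (by name: the statement is the Claim_ definition above) =====
theorem analyze_question_topic_py_spec : Claim_equal_analyze_question_topic_py := by
  intro question _
  unfold Spec_analyze_question_topic_py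
  rw [alt_eq]
  have h1 := contains_found_eq question "client_acquisition" ["client", "customer", "sell"]
    (by decide) (by intro pred; simp [KEYWORD_TOPIC])
  have h2 := contains_found_eq question "pricing" ["price", "charge", "cost"]
    (by decide) (by intro pred; simp [KEYWORD_TOPIC])
  have h3 := contains_found_eq question "tools" ["tool", "software", "app"]
    (by decide) (by intro pred; simp [KEYWORD_TOPIC])
  have h4 := contains_found_eq question "design" ["logo", "brand", "design"]
    (by decide) (by intro pred; simp [KEYWORD_TOPIC])
  have h5 := contains_found_eq question "earnings" ["money", "income", "revenue"]
    (by decide) (by intro pred; simp [KEYWORD_TOPIC])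
  simp only [analyze_question_topic_py, TOPIC_ORDER, List.filter_cons, List.filter_nil,
    h1, h2, h3, h4, h5]
  generalize (["client", "customer", "sell"].any
      (fun w => PySem.Str.isIn w (PySem.Str.lower question))) = b1
  generalize (["price", "charge", "cost"].any
      (fun w => PySem.Str.isIn w (PySem.Str.lower question))) = b2
  generalize (["tool", "software", "app"].any
      (fun w => PySem.Str.isIn w (PySem.Str.lower question))) = b3
  generalize (["logo", "brand", "design"].any
      (fun w => PySem.Str.isIn w (PySem.Str.lower question))) = b4
  generalize (["money", "income", "revenue"].any
      (fun w => PySem.Str.isIn w (PySem.Str.lower question))) = b5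
  cases b1 <;> cases b2 <;> cases b3 <;> cases b4 <;> cases b5 <;> rfl
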